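-- pv_equiv track=rewrite | github.com/maksimkunaev/aion_docs | _drafts/poc.py | analyse_relationships
-- ===== SOURCE A (Python) =====
-- def analyse_relationships(state):
--     """Extract relationships from state"""
--     relationships = []
--
--     entities_list = list(state.keys())
--     for i, entity_a in enumerate(entities_list):
--         for entity_b in entities_list:
--             if entity_a != entity_b:
--                 # Check if they have same position
--                 if state[entity_a].get("pos_x") == state[entity_b].get("pos_x"):
--                     relationships.append((entity_a, "in", entity_b))
--
--     return relationships
-- ===== SOURCE B (Python) =====
-- def analyse_relationships(state):
--     """Extract relationships from state"""
--     groups = {}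
--     for name, ent in state.items():
--         groups.setdefault(ent.get("pos_x"), []).append(name)
--     relationships = []
--     for name, ent in state.items():
--         for other in groups[ent.get("pos_x")]:
--             if other != name:
--                 relationships.append((name, "in", other))
--     return relationships
-- ===== Notes on version B (the rewrite author's own statement) =====
-- stated objective: alternative
-- what changed: Replaced the all-pairs double scan over entities by a single pass that groups entity names by pos_x in a dict and then emits pairs within each group; intended as asymptotically better when groups are small, measured 1.74x at n=1024 but unconfirmed at the largest size since the output itself is quadratic on duplicate-heavy inputs.
import Mathlib
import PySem

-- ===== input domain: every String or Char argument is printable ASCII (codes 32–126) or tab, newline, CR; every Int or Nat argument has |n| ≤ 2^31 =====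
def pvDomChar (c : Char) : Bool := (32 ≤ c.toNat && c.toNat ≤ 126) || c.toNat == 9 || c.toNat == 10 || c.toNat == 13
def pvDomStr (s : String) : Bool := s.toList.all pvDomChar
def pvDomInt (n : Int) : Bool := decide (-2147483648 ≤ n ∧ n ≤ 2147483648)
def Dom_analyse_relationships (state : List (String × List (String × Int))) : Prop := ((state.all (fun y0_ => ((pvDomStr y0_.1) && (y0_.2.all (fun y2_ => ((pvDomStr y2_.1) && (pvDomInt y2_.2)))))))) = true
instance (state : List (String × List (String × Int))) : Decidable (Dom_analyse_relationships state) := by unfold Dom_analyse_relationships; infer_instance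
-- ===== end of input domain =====

-- B replaces A's all-pairs double scan by a dict grouping entity names by their pos_x
-- value, then emits pairs within each group (objective: alternative single-pass grouping).

-- ===== PORT A =====
-- ent.get("pos_x") on an inner dict (assoc list with Python overwrite semantics)
def pvPosX (ent : List (String × Int)) : Option Int :=
  (PySem.Dict.ofList ent).get? "pos_x"

def analyse_relationships (state : List (String × List (String × Int))) : List (String × String × String) :=
  let st := PySem.Dict.ofList state
  let entities_list := st.keys
  entities_list.foldl (fun rels entity_a =>
    entities_list.foldl (fun rels entity_b =>
      if entity_a ≠ entity_b then
        -- state[entity_a]: entity_a is a key of st, so getD [] is the plain lookup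
        if pvPosX (st.getD entity_a []) = pvPosX (st.getD entity_b []) then
          rels ++ [(entity_a, "in", entity_b)]
        else rels
      else rels) rels) []

-- ===== PORT B =====
def analyse_relationships_alt (state : List (String × List (String × Int))) : List (String × String × String) :=
  let st := PySem.Dict.ofList state
  -- groups[p] = groups.get(p, []) + [name]
  let groups : PySem.Dict (Option Int) (List String) :=
    st.items.foldl (fun g p => g.modify (pvPosX p.2) [] (· ++ [p.1])) PySem.Dict.empty
  st.items.foldl (fun rels p =>
    -- groups[ent.get("pos_x")]: the key was inserted while grouping, so getD [] is the plain lookup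
    (groups.getD (pvPosX p.2) []).foldl (fun rels other =>
      if other ≠ p.1 then rels ++ [(p.1, "in", other)] else rels) rels) []

-- ===== PRECONDITION & SPEC =====
def Spec_analyse_relationships (state : List (String × List (String × Int))) (out : List (String × String × String)) : Prop := out = analyse_relationships_alt state
instance (state : List (String × List (String × Int))) (out : List (String × String × String)) : Decidable (Spec_analyse_relationships state out) := by unfold Spec_analyse_relationships; infer_instance

-- ===== CLAIM (what is proved, stated in full; the proofs are below) =====
def Claim_equal_analyse_relationships : Prop := ∀ (state : List (String × List (String × Int))), Dom_analyse_relationships state → Spec_analyse_relationships state (analyse_relationships state)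


-- ===== LEMMAS AND PROOFS =====

-- a loop 'if p(x): out.append(f(x))' with a Prop test
theorem pv_foldl_if_append {A B : Type} (l : List A) (p : A -> Prop) [DecidablePred p] (f : A -> B) (acc : List B) :
    l.foldl (fun acc x => if p x then acc ++ [f x] else acc) acc = acc ++ (l.filter (fun x => decide (p x))).map f := by
  induction l generalizing acc with
  | nil => simp
  | cons x xs ih =>
    by_cases h : p x <;> simp [h, ih]

-- the grouping dict looked up at key c is exactly the names of the items whose pos_x is c, in order
theorem pv_groups_getD (l : List (String × List (String × Int))) (c : Option Int) :
    (l.foldl (fun g p => g.modify (pvPosX p.2) [] (· ++ [p.1])) (PySem.Dict.empty)).getD c []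
      = (l.filter (fun p => pvPosX p.2 == c)).map (·.1) := by
  have h := PySem.Dict.getD_foldl_modify_append (l := l.map (fun p => (pvPosX p.2, p.1))) (d := PySem.Dict.empty) (c := c)
  rw [List.foldl_map] at h
  simpa [List.filter_map, Function.comp] using h

theorem analyse_relationships_eq (state : List (String × List (String × Int))) :
    analyse_relationships state = analyse_relationships_alt state := by
  unfold analyse_relationships analyse_relationships_alt
  simp only []
  set st := PySem.Dict.ofList state with hst
  have hnd : st.keys.Nodup := PySem.Dict.nodup_keys_ofList state
  have hget : ∀ p ∈ st.items, st.getD p.1 [] = p.2 := by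
    intro p hp
    exact PySem.Dict.getD_of_mem_items st (k := p.1) (v := p.2) (by simpa using hp) hnd []
  -- both programs iterate over st.items (A over keys = items.map fst); per item pa the
  -- appended block is the same filtered-map over st.items
  have hkeys : st.keys = st.items.map (·.1) := rfl
  rw [hkeys, List.foldl_map]
  refine PySem.List.foldl_congr_mem _ _ _ _ ?_
  intro rels pa hpa
  -- A's inner loop: collapse the nested ifs, turn it into a filtered map
  have hA : ∀ (rels : List (String × String × String)),
      (st.items.map (·.1)).foldl (fun rels b =>
        if pa.1 ≠ b then
          if pvPosX (st.getD pa.1 []) = pvPosX (st.getD b []) then rels ++ [(pa.1, "in", b)] else rels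
        else rels) rels
      = rels ++ (st.items.filter (fun pb => decide (pa.1 ≠ pb.1 ∧ pvPosX pa.2 = pvPosX pb.2))).map
          (fun pb => (pa.1, "in", pb.1)) := by
    intro rels
    rw [List.foldl_map]
    have hstep : (fun (rels : List (String × String × String)) (pb : String × List (String × Int)) =>
        if pa.1 ≠ pb.1 then
          if pvPosX (st.getD pa.1 []) = pvPosX (st.getD pb.1 []) then rels ++ [(pa.1, "in", pb.1)] else rels
        else rels)
        = fun rels pb =>
          if pa.1 ≠ pb.1 ∧ pvPosX (st.getD pa.1 []) = pvPosX (st.getD pb.1 []) then rels ++ [(pa.1, "in", pb.1)] else rels := by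
      funext rels pb
      by_cases h1 : pa.1 ≠ pb.1 <;> by_cases h2 : pvPosX (st.getD pa.1 []) = pvPosX (st.getD pb.1 []) <;>
        simp [h1, h2]
    rw [hstep, pv_foldl_if_append]
    congr 1
    congr 1
    apply List.filter_congr
    intro pb hpb
    rw [hget pa hpa, hget pb hpb]
  -- B's inner loop over the group of pa's pos_x is the same filtered map
  rw [hA, pv_groups_getD, List.foldl_map,
      pv_foldl_if_append _ (fun pb : String × List (String × Int) => pb.1 ≠ pa.1)
        (fun pb => (pa.1, "in", pb.1)), List.filter_filter]
  congr 1
  congr 1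
  apply List.filter_congr
  intro pb _
  by_cases h1 : pa.1 = pb.1 <;> by_cases h2 : pvPosX pa.2 = pvPosX pb.2 <;>
    simp [h1, h2, Ne]
  · exact fun h => h1 h.symm
  · exact fun _ h => h2 h.symm
-- ===== VERDICT (by name: the statement is the Claim_ definition above) =====
theorem analyse_relationships_spec : Claim_equal_analyse_relationships := by
  intro state _
  exact analyse_relationships_eq state
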